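-- pv_equiv track=rewrite | github.com/ZeroClasswork/Using-Markov-Chains-to-Generate-Fanfic-Quotes | histogram.py | tuples_histogram
-- ===== SOURCE A (Python) =====
-- def tuples_histogram(source_list):
--     histogram = list()
--     for word in source_list:
--         found = False
--         for pair in histogram:
--             if pair[0] == word and not found:
--                 number = pair[1] + 1
--                 histogram.remove(pair)
--                 histogram.append((word, number))
--                 found = True
--         if not found:
--             histogram.append((word, 1))
--
--     return histogram
-- ===== SOURCE B (Python) =====
-- def tuples_histogram(source_list):
--     # One reversed pass: count occurrences and record each word the first
--     # time it is seen from the right (= its last occurrence in the original),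
--     # then emit (word, count) in last-occurrence order, matching A.
--     counts = {}
--     order = []
--     for word in reversed(source_list):
--         if word in counts:
--             counts[word] += 1
--         else:
--             counts[word] = 1
--             order.append(word)
--     order.reverse()
--     return [(word, counts[word]) for word in order]
-- ===== Notes on version B (the rewrite author's own statement) =====
-- stated objective: faster
-- what changed: Replaces A's quadratic scan-and-move-to-end over the growing histogram list with a single reversed pass using a dict of counts plus a last-occurrence order list.
import Mathlib
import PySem

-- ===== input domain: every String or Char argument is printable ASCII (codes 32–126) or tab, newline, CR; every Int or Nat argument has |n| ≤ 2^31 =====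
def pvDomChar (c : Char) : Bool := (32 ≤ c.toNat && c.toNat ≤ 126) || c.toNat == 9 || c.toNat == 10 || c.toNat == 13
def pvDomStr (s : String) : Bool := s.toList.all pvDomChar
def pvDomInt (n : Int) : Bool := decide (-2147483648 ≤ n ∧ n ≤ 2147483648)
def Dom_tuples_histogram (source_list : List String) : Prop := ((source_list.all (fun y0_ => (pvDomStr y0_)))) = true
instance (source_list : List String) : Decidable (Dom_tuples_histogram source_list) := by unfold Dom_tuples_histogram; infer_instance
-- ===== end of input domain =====

-- B replaces A's quadratic scan-and-move-to-end with a single reversed pass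
-- (a counts dict plus a last-occurrence order list); objective: faster.

-- ===== PORT A =====
-- Python's `for pair in histogram` iterates by index over the LIVE list; the
-- body removes one element and appends one, so the length is unchanged and the
-- internal index keeps advancing — modelled literally by `i`.
def innerLoopA (w : String) (i : Nat) (hist : List (String × Int)) (found : Bool) :
    List (String × Int) × Bool :=
  if h : i < hist.length then
    let pair := hist[i]
    if pair.1 == w && !found then
      innerLoopA w (i + 1) (hist.erase pair ++ [(w, pair.2 + 1)]) true
    else
      innerLoopA w (i + 1) hist found
  else (hist, found)
termination_by hist.length - i
decreasing_by
  · have hm : hist[i] ∈ hist := List.getElem_mem h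
    have := List.length_erase_of_mem hm
    simp [List.length_append, this]
    omega
  · omega

def tuples_histogram (source_list : List String) : List (String × Int) :=
  source_list.foldl
    (fun hist word =>
      let r := innerLoopA word 0 hist false
      if r.2 then r.1 else r.1 ++ [(word, 1)])
    []

-- ===== PORT B =====
def tuples_histogram_alt (source_list : List String) : List (String × Int) :=
  let st := source_list.reverse.foldl
    (fun (st : PySem.Dict String Int × List String) word =>
      if st.1.contains word then
        (st.1.insert word (st.1.getD word 0 + 1), st.2)
      else
        (st.1.insert word 1, st.2 ++ [word]))
    (PySem.Dict.empty, [])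
  st.2.reverse.map (fun word => (word, st.1.getD word 0))

-- ===== PRECONDITION & SPEC =====
def Spec_tuples_histogram (source_list : List String) (out : List (String × Int)) : Prop := out = tuples_histogram_alt source_list
instance (source_list : List String) (out : List (String × Int)) : Decidable (Spec_tuples_histogram source_list out) := by unfold Spec_tuples_histogram; infer_instance

-- ===== CLAIM (what is proved, stated in full; the proofs are below) =====
def Claim_equal_tuples_histogram : Prop := ∀ (source_list : List String), Dom_tuples_histogram source_list → Spec_tuples_histogram source_list (tuples_histogram source_list)

-- ===== LEMMAS AND PROOFS =====

-- The common characterisation: counts of words, in last-occurrence order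
-- (Mathlib's List.dedup keeps the LAST occurrence of each element).
def histSpec (p : List String) : List (String × Int) :=
  p.dedup.map (fun u => (u, (p.count u : Int)))

lemma dedup_append_singleton (p : List String) (w : String) :
    (p ++ [w]).dedup = p.dedup.erase w ++ [w] := by
  induction p with
  | nil => simp
  | cons a p ih =>
    rw [List.cons_append]
    by_cases hap : a ∈ p
    · rw [List.dedup_cons_of_mem (by simp [hap] : a ∈ p ++ [w]),
        List.dedup_cons_of_mem hap, ih]
    · by_cases haw : a = w
      · subst haw
        have hnd : a ∉ p.dedup := by simpa using hap
        rw [List.dedup_cons_of_mem (by simp : a ∈ p ++ [a]),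
          List.dedup_cons_of_notMem hap, ih, List.erase_cons_head,
          List.erase_of_not_mem hnd]
      · rw [List.dedup_cons_of_notMem (by simp [hap, haw] : a ∉ p ++ [w]),
          List.dedup_cons_of_notMem hap, ih,
          List.erase_cons_tail (by simpa using haw), List.cons_append]

lemma find?_beq_eq (l : List String) (w : String) :
    l.find? (fun u => u == w) = if w ∈ l then some w else none := by
  induction l with
  | nil => simp
  | cons a l ih =>
    by_cases haw : a = w
    · subst haw; simp
    · have hwa : ¬ w = a := fun h => haw h.symm
      simp [beq_iff_eq, haw, hwa, ih]

lemma erase_map_fst (l : List String) (f : String → String × Int) (w : String)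
    (hf : ∀ u, (f u).1 = u) (hnd : l.Nodup) (hw : w ∈ l) :
    (l.map f).erase (f w) = (l.erase w).map f := by
  induction l with
  | nil => simp at hw
  | cons a l ih =>
    by_cases haw : a = w
    · subst haw
      have : (f a == f a) = true := by simp
      simp [List.erase_cons_head]
    · have hfw : ¬ (f a == f w) = true := by
        simp only [beq_iff_eq]
        intro h
        exact haw (by rw [← hf a, ← hf w, h])
      have hw' : w ∈ l := by cases hw with
        | head => exact absurd rfl haw
        | tail _ h => exact h
      simp only [List.map_cons, List.erase_cons,
        show ((f a == f w) = false) from by simpa using hfw,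
        show ((a == w) = false) from by simpa using haw, if_false,
        Bool.false_eq_true]
      rw [ih hnd.of_cons hw']

-- A's inner loop after `found` became true never touches the list again.
lemma innerLoopA_true (w : String) : ∀ n i (hist : List (String × Int)),
    hist.length - i ≤ n → innerLoopA w i hist true = (hist, true) := by
  intro n
  induction n with
  | zero =>
    intro i hist h
    rw [innerLoopA]
    have : ¬ i < hist.length := by omega
    simp [this]
  | succ n ih =>
    intro i hist h
    rw [innerLoopA]
    by_cases hi : i < hist.length
    · simp only [hi, dif_pos]
      have : (hist[i].1 == w && !true) = false := by simp
      simp only [this, Bool.false_eq_true, if_false]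
      exact ih (i + 1) hist (by omega)
    · simp [hi]

-- A's inner loop from index i: find the first matching pair at or after i,
-- remove it and append the bumped pair; otherwise return unchanged.
lemma innerLoopA_false (w : String) : ∀ n i (hist : List (String × Int)),
    hist.length - i ≤ n →
    innerLoopA w i hist false =
      match (hist.drop i).find? (fun p => p.1 == w) with
      | some pair => (hist.erase pair ++ [(w, pair.2 + 1)], true)
      | none => (hist, false) := by
  intro n
  induction n with
  | zero =>
    intro i hist h
    have hge : ¬ i < hist.length := by omega
    rw [innerLoopA]
    simp [hge, List.drop_eq_nil_of_le (by omega : hist.length ≤ i)]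
  | succ n ih =>
    intro i hist h
    rw [innerLoopA]
    by_cases hi : i < hist.length
    · have hdrop : hist.drop i = hist[i] :: hist.drop (i + 1) :=
        (List.getElem_cons_drop hi).symm
      simp only [hi, dif_pos]
      by_cases hm : hist[i].1 = w
      · have : (hist[i].1 == w && !false) = true := by simp [hm]
        simp only [this, if_true]
        rw [innerLoopA_true w (hist.length - (i+1)) (i+1) _ (by
          have hmem : hist[i] ∈ hist := List.getElem_mem hi
          have := List.length_erase_of_mem hmem
          simp [List.length_append, this]
          omega)]
        rw [hdrop, List.find?_cons]
        simp [hm]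
      · have : (hist[i].1 == w && !false) = false := by simp [hm]
        simp only [this, Bool.false_eq_true, if_false]
        rw [ih (i + 1) hist (by omega), hdrop, List.find?_cons]
        simp [show (hist[i].1 == w) = false from by simpa using hm]
    · simp [hi, List.drop_eq_nil_of_le (by omega : hist.length ≤ i)]

-- One outer-loop step of A, on the characterised state.
lemma stepA_histSpec (p : List String) (w : String) :
    (let r := innerLoopA w 0 (histSpec p) false;
     if r.2 then r.1 else r.1 ++ [(w, 1)]) = histSpec (p ++ [w]) := by
  have hfind : ((histSpec p).drop 0).find? (fun q => q.1 == w) =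
      if w ∈ p then some (w, (p.count w : Int)) else none := by
    simp only [List.drop_zero, histSpec, List.find?_map]
    have : ((fun q : String × Int => q.1 == w) ∘ fun u => (u, (p.count u : Int)))
        = fun u => u == w := by funext u; simp
    rw [this, find?_beq_eq]
    by_cases hw : w ∈ p <;> simp [hw, List.mem_dedup]
  rw [innerLoopA_false w (histSpec p).length 0 _ (by omega), hfind]
  by_cases hw : w ∈ p
  · simp only [hw, if_true]
    have hwd : w ∈ p.dedup := by simpa [List.mem_dedup] using hw
    have herase : (histSpec p).erase (w, (p.count w : Int))
        = (p.dedup.erase w).map (fun u => (u, (p.count u : Int))) :=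
      erase_map_fst p.dedup _ w (fun u => rfl) p.nodup_dedup hwd
    simp only [herase]
    rw [histSpec, dedup_append_singleton, List.map_append]
    congr 1
    · apply List.map_congr_left
      intro u hu
      have hne : u ≠ w := ((p.nodup_dedup.mem_erase_iff).mp hu).1
      simp [List.count_append, List.count_eq_zero, hne]
    · simp [List.count_append]
  · simp only [hw, if_false, Bool.false_eq_true]
    conv_rhs => rw [histSpec, dedup_append_singleton, List.map_append]
    have hnd : w ∉ p.dedup := by simpa [List.mem_dedup] using hw
    rw [List.erase_of_not_mem hnd]
    congr 1
    · rw [histSpec]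
      apply List.map_congr_left
      intro u hu
      have hne : u ≠ w := fun h => hnd (h ▸ hu)
      simp [List.count_append, List.count_eq_zero, hne]
    · have : p.count w = 0 := List.count_eq_zero.mpr hw
      simp [List.count_append, this]

lemma A_foldl (xs : List String) : ∀ p : List String,
    xs.foldl
      (fun hist word =>
        let r := innerLoopA word 0 hist false
        if r.2 then r.1 else r.1 ++ [(word, 1)])
      (histSpec p) = histSpec (p ++ xs) := by
  induction xs with
  | nil => intro p; simp
  | cons w xs ih =>
    intro p
    rw [List.foldl_cons, stepA_histSpec p w, ih (p ++ [w])]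
    simp

lemma A_eq_histSpec (xs : List String) : tuples_histogram xs = histSpec xs := by
  have h := A_foldl xs []
  rw [show histSpec [] = ([] : List (String × Int)) from by simp [histSpec],
    List.nil_append] at h
  exact h

-- B's fold invariant: the dict holds the counts of the processed prefix and
-- the order list (reversed) is the dedup of the reversed prefix.
lemma B_inv : ∀ (rest q : List String) (d : PySem.Dict String Int) (ord : List String),
    (∀ u, d.getD u 0 = (q.count u : Int)) →
    (∀ u, d.contains u = decide (u ∈ q)) →
    ord.reverse = q.reverse.dedup →
    (∀ u, (rest.foldl
        (fun (st : PySem.Dict String Int × List String) word =>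
          if st.1.contains word then
            (st.1.insert word (st.1.getD word 0 + 1), st.2)
          else
            (st.1.insert word 1, st.2 ++ [word]))
        (d, ord)).1.getD u 0 = ((q ++ rest).count u : Int)) ∧
    (rest.foldl
        (fun (st : PySem.Dict String Int × List String) word =>
          if st.1.contains word then
            (st.1.insert word (st.1.getD word 0 + 1), st.2)
          else
            (st.1.insert word 1, st.2 ++ [word]))
        (d, ord)).2.reverse = (q ++ rest).reverse.dedup := by
  intro rest
  induction rest with
  | nil => intro q d ord h1 h2 h3; simpa using ⟨h1, h3⟩
  | cons w rest ih =>
    intro q d ord h1 h2 h3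
    rw [List.foldl_cons]
    by_cases hw : w ∈ q
    · have hc : d.contains w = true := by rw [h2]; simp [hw]
      simp only [hc, if_true]
      have := ih (q ++ [w]) (d.insert w (d.getD w 0 + 1)) ord
        (fun u => by
          rw [PySem.Dict.getD_insert]
          by_cases huw : u = w
          · subst huw; simp [List.count_append, h1]
          · simp [huw, h1, List.count_append, Ne.symm huw])
        (fun u => by
          rw [PySem.Dict.contains_insert, h2]
          by_cases huw : u = w
          · subst huw; simp [hw]
          · simp [List.mem_append, huw])
        (by
          rw [h3, List.reverse_append]
          simp only [List.reverse_cons, List.reverse_nil, List.nil_append,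
            List.singleton_append]
          rw [List.dedup_cons_of_mem (by simpa using hw)])
      simpa using this
    · have hc : d.contains w = false := by rw [h2]; simp [hw]
      simp only [hc, Bool.false_eq_true, if_false]
      have := ih (q ++ [w]) (d.insert w 1) (ord ++ [w])
        (fun u => by
          rw [PySem.Dict.getD_insert]
          by_cases huw : u = w
          · subst huw
            have : q.count u = 0 := List.count_eq_zero.mpr hw
            simp [List.count_append, this]
          · simp [huw, h1, List.count_append, Ne.symm huw])
        (fun u => by
          rw [PySem.Dict.contains_insert, h2]
          by_cases huw : u = w
          · subst huw; simp
          · simp [List.mem_append, huw])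
        (by
          rw [List.reverse_append, List.reverse_append]
          simp only [List.reverse_cons, List.reverse_nil, List.nil_append,
            List.singleton_append]
          rw [List.dedup_cons_of_notMem (by simpa using hw), h3])
      simpa using this

lemma B_eq_histSpec (xs : List String) : tuples_histogram_alt xs = histSpec xs := by
  have h := B_inv xs.reverse [] PySem.Dict.empty []
    (fun u => by simp) (fun u => by simp) (by simp)
  rw [tuples_histogram_alt]
  simp only [List.nil_append] at h
  obtain ⟨h1, h2⟩ := h
  rw [histSpec]
  have h2' : (xs.reverse.foldl
      (fun (st : PySem.Dict String Int × List String) word =>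
        if st.1.contains word then
          (st.1.insert word (st.1.getD word 0 + 1), st.2)
        else
          (st.1.insert word 1, st.2 ++ [word]))
      (PySem.Dict.empty, [])).2.reverse = xs.dedup := by
    rw [h2]; simp
  rw [h2']
  apply List.map_congr_left
  intro u _
  rw [h1 u]
  simp

-- ===== VERDICT (by name: the statement is the Claim_ definition above) =====
theorem tuples_histogram_spec : Claim_equal_tuples_histogram := by
  intro xs _
  unfold Spec_tuples_histogram
  rw [A_eq_histSpec, B_eq_histSpec]
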